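-- pv_equiv track=rewrite | github.com/Consensys/linea-monorepo | tracer/scripts/split.py | process_range
-- ===== SOURCE A (Python) =====
-- BATCH_SIZE = 5
--
-- def process_range(int1, int2):
--     ranges = []
--     start = int1
--     while start <= int2:
--         end = min((start // BATCH_SIZE + 1) * BATCH_SIZE - 1, int2)
--         ranges.append(f"{start}-{end}")
--         start = end + 1
--     ranges.append('###############')
--     return ranges
-- ===== SOURCE B (Python) =====
-- BATCH_SIZE = 5
--
-- def process_range(int1, int2):
--     # walk the range BACKWARD from the top, peeling off the last batch-aligned
--     # block each time, collecting the strings back-to-front, then reverse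
--     rev = []
--     i2 = int2
--     while i2 >= int1:
--         s = max(int1, i2 - i2 % BATCH_SIZE)
--         rev.append(f"{s}-{i2}")
--         i2 = s - 1
--     return rev[::-1] + ['###############']
-- ===== Notes on version B (the rewrite author's own statement) =====
-- stated objective: alternative
-- what changed: Replaces A's forward loop (advancing a start pointer and computing each block's end) with a backward walk from the top that peels off the last batch-aligned block each step, computing each block's start and building the output back-to-front before a final reverse.
import Mathlib
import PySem

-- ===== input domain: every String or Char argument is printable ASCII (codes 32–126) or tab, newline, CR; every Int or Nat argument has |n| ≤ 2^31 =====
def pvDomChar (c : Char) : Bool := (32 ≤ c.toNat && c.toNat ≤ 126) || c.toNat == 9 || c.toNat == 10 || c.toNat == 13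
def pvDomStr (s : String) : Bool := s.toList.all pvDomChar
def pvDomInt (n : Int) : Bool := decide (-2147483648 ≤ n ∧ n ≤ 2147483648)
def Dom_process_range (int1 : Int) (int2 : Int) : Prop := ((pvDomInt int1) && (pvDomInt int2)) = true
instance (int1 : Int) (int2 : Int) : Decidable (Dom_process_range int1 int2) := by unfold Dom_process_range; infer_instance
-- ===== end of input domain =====

-- B replaces A's forward loop (start pointer advanced block by block, end computed
-- per block) with a backward walk from the top that peels off the LAST batch-aligned
-- block each step, building the output back-to-front and reversing at the end
-- (objective: alternative decomposition, same cost).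

-- ===== PORT A =====
-- while start <= int2: end = min((start // 5 + 1) * 5 - 1, int2); append; start = end + 1
def process_range_loop (int2 : Int) (start : Int) (ranges : List String) : List String :=
  if _h : start ≤ int2 then
    let e := min ((PySem.Int.floordiv start 5 + 1) * 5 - 1) int2
    process_range_loop int2 (e + 1)
      (ranges ++ [PySem.Int.toStr start ++ "-" ++ PySem.Int.toStr e])
  else ranges
termination_by (int2 + 1 - start).toNat
decreasing_by
  have hd := PySem.Int.floordiv_mul_add_mod start 5
  have h0 := PySem.Int.mod_nonneg start (b := 5) (by norm_num)
  have h1 := PySem.Int.mod_lt start (b := 5) (by norm_num)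
  omega

def process_range (int1 : Int) (int2 : Int) : List String :=
  process_range_loop int2 int1 [] ++ ["###############"]

-- ===== PORT B =====
-- rev = []; i2 = int2
-- while i2 >= int1: s = max(int1, i2 - i2 % 5); rev.append(f"{s}-{i2}"); i2 = s - 1
-- return rev[::-1] + ['###############']        (rev[::-1] ported as List.reverse: exact)
def process_range_alt_loop (int1 : Int) (i2 : Int) (rev : List String) : List String :=
  if _h : i2 ≥ int1 then
    let s := max int1 (i2 - PySem.Int.mod i2 5)
    process_range_alt_loop int1 (s - 1) (rev ++ [PySem.Int.toStr s ++ "-" ++ PySem.Int.toStr i2])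
  else rev
termination_by (i2 + 1 - int1).toNat
decreasing_by
  have h0 := PySem.Int.mod_nonneg i2 (b := 5) (by norm_num)
  omega

def process_range_alt (int1 : Int) (int2 : Int) : List String :=
  (process_range_alt_loop int1 int2 []).reverse ++ ["###############"]

-- ===== PRECONDITION & SPEC =====
def Spec_process_range (int1 : Int) (int2 : Int) (out : List String) : Prop := out = process_range_alt int1 int2
instance (int1 : Int) (int2 : Int) (out : List String) : Decidable (Spec_process_range int1 int2 out) := by unfold Spec_process_range; infer_instance

-- ===== CLAIM (what is proved, stated in full; the proofs are below) =====
def Claim_equal_process_range : Prop := ∀ (int1 : Int) (int2 : Int), Dom_process_range int1 int2 → Spec_process_range int1 int2 (process_range int1 int2)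

-- ===== LEMMAS AND PROOFS =====

-- the common middle form both programs are proved equal to: one string per block index
def pvBlocks (int1 int2 : Int) : List String :=
  (PySem.List.pyRange (PySem.Int.floordiv int1 5) (PySem.Int.floordiv int2 5 + 1) 1).map
    (fun b => PySem.Int.toStr (max int1 (b * 5)) ++ "-" ++
              PySem.Int.toStr (min int2 ((b + 1) * 5 - 1)))

theorem floordiv_five_mul (q : Int) : PySem.Int.floordiv (5 * q) 5 = q := by
  rw [PySem.Int.floordiv_eq_iff_of_pos (by norm_num)]
  constructor <;> nlinarith

theorem loop_eq (int1 int2 : Int) (h12 : int1 ≤ int2) :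
    ∀ (n : Nat) (start : Int) (acc : List String),
      (int2 + 1 - start).toNat ≤ n → int1 ≤ start →
      (start = int1 ∨ start = 5 * PySem.Int.floordiv start 5) →
      process_range_loop int2 start acc = acc ++ pvBlocks start int2 := by
  intro n
  induction n with
  | zero =>
      intro start acc hn h1s hinv
      have hgt : int2 < start := by omega
      have hd := PySem.Int.floordiv_mul_add_mod int2 5
      have h0 := PySem.Int.mod_nonneg int2 (b := 5) (by norm_num)
      have h1 := PySem.Int.mod_lt int2 (b := 5) (by norm_num)
      rw [process_range_loop]
      rw [dif_neg (by omega)]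
      have hq : start = 5 * PySem.Int.floordiv start 5 := by
        rcases hinv with h | h
        · omega
        · exact h
      have he1 := PySem.Int.floordiv_eq_ediv_of_pos (a := int2) (b := 5) (by norm_num)
      have he2 := PySem.Int.floordiv_eq_ediv_of_pos (a := start) (b := 5) (by norm_num)
      simp [pvBlocks, PySem.List.pyRange_one]
      omega
  | succ n ih =>
      intro start acc hn h1s hinv
      by_cases hle : start ≤ int2
      · rw [process_range_loop, dif_pos hle]
        have hds := PySem.Int.floordiv_mul_add_mod start 5
        have h0s := PySem.Int.mod_nonneg start (b := 5) (by norm_num)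
        have h1s' := PySem.Int.mod_lt start (b := 5) (by norm_num)
        have hd2 := PySem.Int.floordiv_mul_add_mod int2 5
        have h02 := PySem.Int.mod_nonneg int2 (b := 5) (by norm_num)
        have h12' := PySem.Int.mod_lt int2 (b := 5) (by norm_num)
        set q := PySem.Int.floordiv start 5 with hq
        set q2 := PySem.Int.floordiv int2 5 with hq2
        have hqq2 : q ≤ q2 := by omega
        have hcons : PySem.List.pyRange q (q2 + 1) 1 = q :: PySem.List.pyRange (q + 1) (q2 + 1) 1 :=
          PySem.List.pyRange_one_cons (by omega)
        have hmax : max start (q * 5) = start := by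
          rcases hinv with h | h <;> omega
        by_cases hfit : (q + 1) * 5 - 1 ≤ int2
        · -- full block: end = (q+1)*5-1, recurse
          have he : min ((q + 1) * 5 - 1) int2 = (q + 1) * 5 - 1 := min_eq_left hfit
          have hfd : PySem.Int.floordiv ((q + 1) * 5 - 1 + 1) 5 = q + 1 := by
            have : (q + 1) * 5 - 1 + 1 = 5 * (q + 1) := by ring
            rw [this, floordiv_five_mul]
          have hrec := ih ((q + 1) * 5 - 1 + 1)
            (acc ++ [PySem.Int.toStr start ++ "-" ++ PySem.Int.toStr ((q + 1) * 5 - 1)])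
            (by omega) (by omega) (Or.inr (by rw [hfd]; ring))
          unfold pvBlocks at hrec ⊢
          rw [hfd, ← hq2] at hrec
          simp only [he]
          rw [hrec, hcons]
          simp only [List.map_cons, List.append_assoc, List.cons_append, List.nil_append,
            hmax, min_comm int2 ((q + 1) * 5 - 1), he]
          congr 2
          apply List.map_congr_left
          intro b hb
          have hb' := (PySem.List.mem_pyRange_one).mp hb
          rw [max_eq_right (by nlinarith), max_eq_right (by nlinarith)]
        · -- last block: end = int2, next start = int2 + 1 terminates
          have he : min ((q + 1) * 5 - 1) int2 = int2 := min_eq_right (by omega)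
          have hq2q : q2 = q := by omega
          have hrest : (q2 + 1 - (q + 1)).toNat = 0 := by omega
          simp only [he]
          rw [process_range_loop, dif_neg (by omega)]
          unfold pvBlocks
          rw [hcons]
          simp only [List.map_cons, hmax]
          have hnil : PySem.List.pyRange (q + 1) (q2 + 1) 1 = [] := by
            rw [PySem.List.pyRange_one, hrest]
            simp
          rw [hnil]
          simp only [List.map_nil]
          rw [min_eq_left (show int2 ≤ (q + 1) * 5 - 1 by omega)]
      · rw [process_range_loop, dif_neg hle]
        have hd := PySem.Int.floordiv_mul_add_mod int2 5
        have h0 := PySem.Int.mod_nonneg int2 (b := 5) (by norm_num)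
        have h1 := PySem.Int.mod_lt int2 (b := 5) (by norm_num)
        have hq : start = 5 * PySem.Int.floordiv start 5 := by
          rcases hinv with h | h
          · omega
          · exact h
        have he1 := PySem.Int.floordiv_eq_ediv_of_pos (a := int2) (b := 5) (by norm_num)
        have he2 := PySem.Int.floordiv_eq_ediv_of_pos (a := start) (b := 5) (by norm_num)
        simp [pvBlocks, PySem.List.pyRange_one]
        omega

-- splitting off the last block of the middle form
theorem blocks_single (int1 i2 : Int) (_hle : int1 ≤ i2)
    (hsame : 5 * PySem.Int.floordiv i2 5 ≤ int1) :
    pvBlocks int1 i2 = [PySem.Int.toStr int1 ++ "-" ++ PySem.Int.toStr i2] := by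
  have hd2 := PySem.Int.floordiv_mul_add_mod i2 5
  have h02 := PySem.Int.mod_nonneg i2 (b := 5) (by norm_num)
  have h12 := PySem.Int.mod_lt i2 (b := 5) (by norm_num)
  have hd1 := PySem.Int.floordiv_mul_add_mod int1 5
  have h01 := PySem.Int.mod_nonneg int1 (b := 5) (by norm_num)
  have h11 := PySem.Int.mod_lt int1 (b := 5) (by norm_num)
  have hq12 : PySem.Int.floordiv int1 5 = PySem.Int.floordiv i2 5 := by omega
  unfold pvBlocks
  rw [hq12, PySem.List.pyRange_one_cons (by omega),
    PySem.List.pyRange_one_eq_nil (by omega)]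
  simp only [List.map_cons, List.map_nil]
  rw [max_eq_left (by omega), min_eq_left (by omega)]

theorem blocks_split (int1 i2 : Int) (_hle : int1 ≤ i2)
    (hsame : ¬ 5 * PySem.Int.floordiv i2 5 ≤ int1) :
    pvBlocks int1 i2 = pvBlocks int1 (5 * PySem.Int.floordiv i2 5 - 1) ++
      [PySem.Int.toStr (5 * PySem.Int.floordiv i2 5) ++ "-" ++ PySem.Int.toStr i2] := by
  have hd2 := PySem.Int.floordiv_mul_add_mod i2 5
  have h02 := PySem.Int.mod_nonneg i2 (b := 5) (by norm_num)
  have h12 := PySem.Int.mod_lt i2 (b := 5) (by norm_num)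
  have hd1 := PySem.Int.floordiv_mul_add_mod int1 5
  have h01 := PySem.Int.mod_nonneg int1 (b := 5) (by norm_num)
  have h11 := PySem.Int.mod_lt int1 (b := 5) (by norm_num)
  set q2 := PySem.Int.floordiv i2 5 with hq2
  have hfd : PySem.Int.floordiv (5 * q2 - 1) 5 = q2 - 1 := by
    rw [PySem.Int.floordiv_eq_iff_of_pos (by norm_num)]
    constructor <;> omega
  unfold pvBlocks
  rw [hfd]
  have h1 : q2 - 1 + 1 = q2 := by ring
  have h2 : PySem.Int.floordiv i2 5 + 1 = q2 + 1 := by omega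
  rw [h1, h2, PySem.List.pyRange_one_succ_right
    (show PySem.Int.floordiv int1 5 ≤ q2 by omega)]
  rw [List.map_append]
  simp only [List.map_cons, List.map_nil]
  have hmapeq : ∀ b ∈ PySem.List.pyRange (PySem.Int.floordiv int1 5) q2 1,
      PySem.Int.toStr (max int1 (b * 5)) ++ "-" ++
        PySem.Int.toStr (min i2 ((b + 1) * 5 - 1)) =
      PySem.Int.toStr (max int1 (b * 5)) ++ "-" ++
        PySem.Int.toStr (min (5 * q2 - 1) ((b + 1) * 5 - 1)) := by
    intro b hb
    have hb' := (PySem.List.mem_pyRange_one).mp hb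
    rw [min_eq_right (by nlinarith), min_eq_right (by nlinarith)]
  rw [List.map_congr_left hmapeq]
  congr 2
  rw [show (5:Int) * q2 = q2 * 5 by ring, max_eq_right (by omega),
    min_eq_left (by omega)]

-- B's backward loop collects the middle form reversed
theorem alt_loop_eq (int1 : Int) : ∀ (n : Nat) (i2 : Int) (rev : List String),
    (i2 + 1 - int1).toNat ≤ n →
    process_range_alt_loop int1 i2 rev =
      rev ++ (if int1 ≤ i2 then pvBlocks int1 i2 else []).reverse := by
  intro n
  induction n with
  | zero =>
      intro i2 rev hn
      rw [process_range_alt_loop, dif_neg (by omega), if_neg (by omega)]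
      simp
  | succ n ih =>
      intro i2 rev hn
      by_cases hle : int1 ≤ i2
      · rw [process_range_alt_loop, dif_pos (by omega), if_pos hle]
        have h02 := PySem.Int.mod_nonneg i2 (b := 5) (by norm_num)
        have h12 := PySem.Int.mod_lt i2 (b := 5) (by norm_num)
        have hd2 := PySem.Int.floordiv_mul_add_mod i2 5
        set q2 := PySem.Int.floordiv i2 5 with hq2
        have hmod : i2 - PySem.Int.mod i2 5 = 5 * q2 := by omega
        by_cases hsame : 5 * q2 ≤ int1
        · have hs : max int1 (i2 - PySem.Int.mod i2 5) = int1 := by rw [hmod]; omega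
          rw [hs]
          show process_range_alt_loop int1 (int1 - 1)
            (rev ++ [PySem.Int.toStr int1 ++ "-" ++ PySem.Int.toStr i2]) = _
          rw [process_range_alt_loop, dif_neg (by omega),
            blocks_single int1 i2 hle (by omega)]
          simp
        · have hs : max int1 (i2 - PySem.Int.mod i2 5) = 5 * q2 := by rw [hmod]; omega
          rw [hs]
          show process_range_alt_loop int1 (5 * q2 - 1)
            (rev ++ [PySem.Int.toStr (5 * q2) ++ "-" ++ PySem.Int.toStr i2]) = _
          rw [ih (5 * q2 - 1) _ (by omega), if_pos (by omega),
            blocks_split int1 i2 hle (by omega)]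
          simp [hq2]
      · rw [process_range_alt_loop, dif_neg (by omega), if_neg hle]
        simp

-- ===== VERDICT (by name: the statement is the Claim_ definition above) =====
theorem process_range_spec : Claim_equal_process_range := by
  intro int1 int2 _
  unfold Spec_process_range process_range process_range_alt
  rw [alt_loop_eq int1 ((int2 + 1 - int1).toNat) int2 [] le_rfl]
  by_cases h : int1 ≤ int2
  · rw [if_pos h, loop_eq int1 int2 h ((int2 + 1 - int1).toNat) int1 [] le_rfl le_rfl (Or.inl rfl)]
    simp
  · rw [if_neg h, process_range_loop, dif_neg h]
    simp
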